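-- pv_equiv track=rewrite | github.com/Tarunchintakunta/Zta-project | lab.py | normalize_course_name
-- ===== SOURCE A (Python) =====
-- def normalize_course_name(course_name):
--     """
--     Normalize the course name by:
--     - Replacing hyphens with spaces.
--     - Removing hyphens entirely (for comparison with names like 'MathematicsII').
--     - Converting everything to lowercase.
--     - Replacing numerals (1, 2) with their Roman counterparts (I, II).
--     """
--     roman_to_numeral = {'1': 'I', '2': 'II', '3': 'III', '4': 'IV', '5': 'V', '6': 'VI', '7': 'VII', '8': 'VIII'}
--     numeral_to_roman = {'I': '1', 'II': '2', 'III': '3', 'IV': '4', 'V': '5', 'VI': '6', 'VII': '7', 'VIII': '8'}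
--
--     for numeral, roman in roman_to_numeral.items():
--         course_name = course_name.replace(str(numeral), roman)
--
--     normalized_name_with_space = course_name.replace("-", " ").lower()
--     normalized_name_without_hyphen = course_name.replace("-", "").lower()
--
--     for roman, numeral in numeral_to_roman.items():
--         normalized_name_with_space = normalized_name_with_space.replace(roman, str(numeral))
--         normalized_name_without_hyphen = normalized_name_without_hyphen.replace(roman, str(numeral))
--
--     return normalized_name_with_space, normalized_name_without_hyphen
-- ===== SOURCE B (Python) =====
-- def normalize_course_name(course_name):
--     """Single pass over the characters: each digit 1-8 becomes its lowercase
--     Roman numeral, a hyphen becomes a space (space variant) or nothing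
--     (no-hyphen variant), everything else is lowercased."""
--     roman = {'1': 'i', '2': 'ii', '3': 'iii', '4': 'iv',
--              '5': 'v', '6': 'vi', '7': 'vii', '8': 'viii'}
--     with_space = []
--     without_hyphen = []
--     for ch in course_name:
--         r = roman.get(ch)
--         if r is not None:
--             with_space.append(r)
--             without_hyphen.append(r)
--         elif ch == '-':
--             with_space.append(' ')
--         else:
--             c = ch.lower()
--             with_space.append(c)
--             without_hyphen.append(c)
--     return ''.join(with_space), ''.join(without_hyphen)
-- ===== Notes on version B (the rewrite author's own statement) =====
-- stated objective: alternative
-- what changed: A runs 8 sequential str.replace passes for digits, two hyphen replace passes, lowercasing, and a dead second loop of 16 more replaces (uppercase keys on lowercased strings); B builds both variants in one character-level pass, mapping each char directly to its piece.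
import Mathlib
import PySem

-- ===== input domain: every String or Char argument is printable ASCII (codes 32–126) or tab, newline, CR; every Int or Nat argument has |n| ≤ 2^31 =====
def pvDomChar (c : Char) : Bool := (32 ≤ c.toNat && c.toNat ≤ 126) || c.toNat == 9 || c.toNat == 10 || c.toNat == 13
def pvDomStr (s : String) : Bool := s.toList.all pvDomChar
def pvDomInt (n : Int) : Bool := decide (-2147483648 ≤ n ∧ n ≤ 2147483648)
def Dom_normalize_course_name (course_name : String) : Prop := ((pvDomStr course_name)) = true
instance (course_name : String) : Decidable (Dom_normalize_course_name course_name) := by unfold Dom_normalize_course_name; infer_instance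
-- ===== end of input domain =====

-- B replaces A's two sequential replace-chains (and A's dead second loop) by one
-- character-level pass that builds both normalized variants simultaneously (objective: alternative).


-- ===== PORT A =====
-- the two dict literals, as association lists in insertion order
def pvRomanToNumeral : List (String × String) :=
  [("1", "I"), ("2", "II"), ("3", "III"), ("4", "IV"),
   ("5", "V"), ("6", "VI"), ("7", "VII"), ("8", "VIII")]
def pvNumeralToRoman : List (String × String) :=
  [("I", "1"), ("II", "2"), ("III", "3"), ("IV", "4"),
   ("V", "5"), ("VI", "6"), ("VII", "7"), ("VIII", "8")]

def normalize_course_name (course_name : String) : String × String :=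
  -- first loop: course_name = course_name.replace(numeral, roman)
  let course_name := pvRomanToNumeral.foldl
    (fun s p => PySem.Str.replace s p.1 p.2) course_name
  let normalized_name_with_space := PySem.Str.lower (PySem.Str.replace course_name "-" " ")
  let normalized_name_without_hyphen := PySem.Str.lower (PySem.Str.replace course_name "-" "")
  -- second loop: both variants replace(roman, numeral)
  pvNumeralToRoman.foldl
    (fun q p => (PySem.Str.replace q.1 p.1 p.2, PySem.Str.replace q.2 p.1 p.2))
    (normalized_name_with_space, normalized_name_without_hyphen)

-- ===== PORT B =====
-- the dict literal roman = {'1': 'i', …, '8': 'viii'} (keys are single chars)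
def pvRomanDictB : PySem.Dict Char (List Char) :=
  PySem.Dict.ofList
    [('1', ['i']), ('2', ['i','i']), ('3', ['i','i','i']), ('4', ['i','v']),
     ('5', ['v']), ('6', ['v','i']), ('7', ['v','i','i']), ('8', ['v','i','i','i'])]

-- the body of B's single loop: append to with_space / without_hyphen
def pvStepB (acc : List Char × List Char) (ch : Char) : List Char × List Char :=
  match PySem.Dict.get? pvRomanDictB ch with
  | some r => (acc.1 ++ r, acc.2 ++ r)
  | none =>
    if ch = '-' then (acc.1 ++ [' '], acc.2)
    else (acc.1 ++ [PySem.Chars.lowerChar ch], acc.2 ++ [PySem.Chars.lowerChar ch])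

def normalize_course_name_alt (course_name : String) : String × String :=
  let p := course_name.toList.foldl pvStepB ([], [])
  (String.ofList p.1, String.ofList p.2)

-- ===== PRECONDITION & SPEC =====
def Spec_normalize_course_name (course_name : String) (out : String × String) : Prop := out = normalize_course_name_alt course_name
instance (course_name : String) (out : String × String) : Decidable (Spec_normalize_course_name course_name out) := by unfold Spec_normalize_course_name; infer_instance

-- ===== CLAIM (what is proved, stated in full; the proofs are below) =====
def Claim_equal_normalize_course_name : Prop := ∀ (course_name : String), Dom_normalize_course_name course_name → Spec_normalize_course_name course_name (normalize_course_name course_name)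

-- ===== LEMMAS AND PROOFS =====

-- per-character value contributed to the with-space variant by B's loop
def pvWsF (c : Char) : List Char :=
  match PySem.Dict.get? pvRomanDictB c with
  | some r => r
  | none => if c = '-' then [' '] else [PySem.Chars.lowerChar c]

-- per-character value contributed to the no-hyphen variant by B's loop
def pvNhF (c : Char) : List Char :=
  match PySem.Dict.get? pvRomanDictB c with
  | some r => r
  | none => if c = '-' then [] else [PySem.Chars.lowerChar c]

theorem pvStepB_eq (acc : List Char × List Char) (c : Char) :
    pvStepB acc c = (acc.1 ++ pvWsF c, acc.2 ++ pvNhF c) := by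
  unfold pvStepB pvWsF pvNhF
  cases PySem.Dict.get? pvRomanDictB c with
  | some r => rfl
  | none => by_cases h : c = '-' <;> simp [h]

theorem foldB_eq (l : List Char) : ∀ (a b : List Char),
    l.foldl pvStepB (a, b) = (a ++ l.flatMap pvWsF, b ++ l.flatMap pvNhF) := by
  induction l with
  | nil => intro a b; simp
  | cons c t ih =>
    intro a b
    simp only [List.foldl_cons, pvStepB_eq, ih, List.flatMap_cons, List.append_assoc]

-- single-character replace is a character-wise flatMap
theorem go_single (p : Char) (rs : List Char) :
    ∀ (fuel : Nat) (l acc : List Char), l.length ≤ fuel →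
      PySem.Chars.replace.go [p] rs fuel l acc
        = acc.reverse ++ l.flatMap (fun c => if c = p then rs else [c]) := by
  intro fuel
  induction fuel with
  | zero =>
    intro l acc h
    have : l = [] := List.eq_nil_of_length_eq_zero (Nat.le_zero.mp h)
    subst this; simp [PySem.Chars.replace.go]
  | succ n ih =>
    intro l acc h
    cases l with
    | nil => simp [PySem.Chars.replace.go]
    | cons c t =>
      simp only [PySem.Chars.replace.go]
      by_cases hc : c = p
      · subst hc
        have hpre : List.isPrefixOf [c] (c :: t) = true := by
          simp [List.isPrefixOf]
        rw [if_pos hpre]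
        have := ih t (rs.reverse ++ acc) (by simpa using Nat.le_of_succ_le_succ h)
        simp only [List.length_cons, List.length_nil, List.drop_succ_cons, List.drop_zero]
        rw [this]
        simp
      · have hpre : List.isPrefixOf [p] (c :: t) = false := by
          simp [List.isPrefixOf, BEq.beq]
          intro hx; exact absurd hx.symm hc
        rw [if_neg (by simp [hpre])]
        have := ih t (c :: acc) (by simpa using Nat.le_of_succ_le_succ h)
        rw [this]
        simp [hc]

theorem replace_single (l : List Char) (p : Char) (rs : List Char) :
    PySem.Chars.replace l [p] rs = l.flatMap (fun c => if c = p then rs else [c]) := by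
  unfold PySem.Chars.replace
  simp [go_single p rs l.length l [] (le_refl _)]

-- replace is the identity when the pattern's first character does not occur
theorem go_absent (old new : List Char) (c : Char) (hc : old.head? = some c) :
    ∀ (fuel : Nat) (l acc : List Char), c ∉ l →
      PySem.Chars.replace.go old new fuel l acc = acc.reverse ++ l := by
  intro fuel
  induction fuel with
  | zero => intro l acc _; cases l <;> simp [PySem.Chars.replace.go]
  | succ n ih =>
    intro l acc hmem
    cases l with
    | nil => simp [PySem.Chars.replace.go]
    | cons x t =>
      simp only [PySem.Chars.replace.go]
      have hpre : old.isPrefixOf (x :: t) = false := by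
        cases old with
        | nil => simp at hc
        | cons o ot =>
          simp at hc
          by_contra hb
          simp at hb
          have : (o :: ot) <+: (x :: t) := List.isPrefixOf_iff_prefix.mp (by simpa using hb)
          have : o ∈ x :: t := this.subset (by simp)
          rw [hc] at this
          exact hmem this
      rw [if_neg (by simp [hpre])]
      have := ih t (x :: acc) (fun h => hmem (by simp [h]))
      rw [this]; simp

theorem replace_absent (l old new : List Char) (c : Char) (hc : old.head? = some c)
    (hmem : c ∉ l) : PySem.Chars.replace l old new = l := by
  unfold PySem.Chars.replace
  have : old.isEmpty = false := by cases old <;> simp_all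
  rw [this]
  simpa using go_absent old new c hc l.length l [] hmem

theorem strReplace_id (s old new : String) (c : Char) (hc : old.toList.head? = some c)
    (hmem : c ∉ s.toList) : PySem.Str.replace s old new = s := by
  apply String.toList_inj.mp
  rw [PySem.Str.toList_replace]
  exact replace_absent s.toList old.toList new.toList c hc hmem

theorem lowerChar_ne_of (c t : Char) (ht1 : 65 ≤ t.toNat) (ht2 : t.toNat ≤ 90) :
    PySem.Chars.lowerChar c ≠ t := by
  have hle : ∀ d : Char, ('A' ≤ d ↔ 65 ≤ d.toNat) ∧ (d ≤ 'Z' ↔ d.toNat ≤ 90) := by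
    intro d
    constructor <;> (simp only [Char.le_def, UInt32.le_iff_toNat_le, Char.toNat_val]; rfl)
  unfold PySem.Chars.lowerChar
  split
  · rename_i h
    simp only [PySem.Chars.isupper, Bool.and_eq_true, decide_eq_true_eq] at h
    have h1 : 65 ≤ c.toNat := (hle c).1.mp h.1
    intro hEq
    have hv : (c.toNat + 32).isValidChar := by
      left
      have h2 : c.toNat ≤ 90 := (hle c).2.mp h.2
      omega
    have hToNat : (Char.ofNat (c.toNat + 32)).toNat = c.toNat + 32 := by
      rw [Char.toNat_ofNat, if_pos hv]
    rw [hEq] at hToNat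
    omega
  · rename_i h
    intro hEq
    rw [hEq] at h
    simp only [PySem.Chars.isupper, Bool.and_eq_true, decide_eq_true_eq, not_and] at h
    exact h ((hle t).1.mpr ht1) ((hle t).2.mpr ht2)

-- a non-digit character is not a key of B's dict literal
theorem get?_none (c : Char) (h1 : c ≠ '1') (h2 : c ≠ '2') (h3 : c ≠ '3') (h4 : c ≠ '4')
    (h5 : c ≠ '5') (h6 : c ≠ '6') (h7 : c ≠ '7') (h8 : c ≠ '8') :
    PySem.Dict.get? pvRomanDictB c = none := by
  have hmk : pvRomanDictB = PySem.Dict.mk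
    [('1', ['i']), ('2', ['i','i']), ('3', ['i','i','i']), ('4', ['i','v']),
     ('5', ['v']), ('6', ['v','i']), ('7', ['v','i','i']), ('8', ['v','i','i','i'])] := by rfl
  rw [hmk]
  simp [Ne.symm h1, Ne.symm h2, Ne.symm h3, Ne.symm h4,
    Ne.symm h5, Ne.symm h6, Ne.symm h7, Ne.symm h8, PySem.Dict.get?]

-- every character that B's per-character pieces emit differs from 'I' and from 'V'
theorem pvWsF_mem_ne (c x : Char) (hx : x ∈ pvWsF c) : x ≠ 'I' ∧ x ≠ 'V' := by
  by_cases h1 : c = '1'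
  · subst h1; rw [show pvWsF '1' = ['i'] from rfl] at hx
    fin_cases hx <;> exact ⟨by decide, by decide⟩
  by_cases h2 : c = '2'
  · subst h2; rw [show pvWsF '2' = ['i','i'] from rfl] at hx
    fin_cases hx <;> exact ⟨by decide, by decide⟩
  by_cases h3 : c = '3'
  · subst h3; rw [show pvWsF '3' = ['i','i','i'] from rfl] at hx
    fin_cases hx <;> exact ⟨by decide, by decide⟩
  by_cases h4 : c = '4'
  · subst h4; rw [show pvWsF '4' = ['i','v'] from rfl] at hx
    fin_cases hx <;> exact ⟨by decide, by decide⟩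
  by_cases h5 : c = '5'
  · subst h5; rw [show pvWsF '5' = ['v'] from rfl] at hx
    fin_cases hx <;> exact ⟨by decide, by decide⟩
  by_cases h6 : c = '6'
  · subst h6; rw [show pvWsF '6' = ['v','i'] from rfl] at hx
    fin_cases hx <;> exact ⟨by decide, by decide⟩
  by_cases h7 : c = '7'
  · subst h7; rw [show pvWsF '7' = ['v','i','i'] from rfl] at hx
    fin_cases hx <;> exact ⟨by decide, by decide⟩
  by_cases h8 : c = '8'
  · subst h8; rw [show pvWsF '8' = ['v','i','i','i'] from rfl] at hx
    fin_cases hx <;> exact ⟨by decide, by decide⟩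
  have hget : PySem.Dict.get? pvRomanDictB c = none :=
    get?_none c h1 h2 h3 h4 h5 h6 h7 h8
  unfold pvWsF at hx
  rw [hget] at hx
  by_cases hd : c = '-'
  · rw [if_pos hd] at hx; simp at hx; subst hx; constructor <;> decide
  · rw [if_neg hd] at hx; simp at hx; subst hx
    exact ⟨lowerChar_ne_of c 'I' (by decide) (by decide),
           lowerChar_ne_of c 'V' (by decide) (by decide)⟩

theorem pvNhF_mem_ne (c x : Char) (hx : x ∈ pvNhF c) : x ≠ 'I' ∧ x ≠ 'V' := by
  by_cases hd : c = '-'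
  · subst hd; rw [show pvNhF '-' = [] from rfl] at hx; cases hx
  · have : x ∈ pvWsF c := by
      unfold pvNhF at hx; unfold pvWsF
      cases hg : PySem.Dict.get? pvRomanDictB c with
      | some r => rw [hg] at hx; exact hx
      | none => rw [hg] at hx; rw [if_neg hd] at hx ⊢; exact hx
    exact pvWsF_mem_ne c x this

-- the first loop followed by hyphen-handling and lowering is B's per-character pass
theorem pipelineA_ws (cn : String) :
    (PySem.Str.lower (PySem.Str.replace
      (pvRomanToNumeral.foldl (fun s p => PySem.Str.replace s p.1 p.2) cn) "-" " ")).toList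
      = cn.toList.flatMap pvWsF := by
  simp only [pvRomanToNumeral, List.foldl_cons, List.foldl_nil,
    PySem.Str.toList_lower, PySem.Str.toList_replace]
  rw [show ("-" : String).toList = ['-'] from rfl, show (" " : String).toList = [' '] from rfl]
  simp only [show ("1" : String).toList = ['1'] from rfl, show ("I" : String).toList = ['I'] from rfl,
    show ("2" : String).toList = ['2'] from rfl, show ("II" : String).toList = ['I','I'] from rfl,
    show ("3" : String).toList = ['3'] from rfl, show ("III" : String).toList = ['I','I','I'] from rfl,
    show ("4" : String).toList = ['4'] from rfl, show ("IV" : String).toList = ['I','V'] from rfl,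
    show ("5" : String).toList = ['5'] from rfl, show ("V" : String).toList = ['V'] from rfl,
    show ("6" : String).toList = ['6'] from rfl, show ("VI" : String).toList = ['V','I'] from rfl,
    show ("7" : String).toList = ['7'] from rfl, show ("VIII" : String).toList = ['V','I','I','I'] from rfl,
    show ("8" : String).toList = ['8'] from rfl, show ("VII" : String).toList = ['V','I','I'] from rfl]
  simp only [replace_single, PySem.Chars.lower, List.map_flatMap, List.flatMap_assoc]
  apply List.flatMap_congr
  intro c _
  by_cases h1 : c = '1'; · subst h1; decide
  by_cases h2 : c = '2'; · subst h2; decide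
  by_cases h3 : c = '3'; · subst h3; decide
  by_cases h4 : c = '4'; · subst h4; decide
  by_cases h5 : c = '5'; · subst h5; decide
  by_cases h6 : c = '6'; · subst h6; decide
  by_cases h7 : c = '7'; · subst h7; decide
  by_cases h8 : c = '8'; · subst h8; decide
  by_cases hd : c = '-'; · subst hd; decide
  simp [h1, h2, h3, h4, h5, h6, h7, h8, hd, pvWsF, get?_none c h1 h2 h3 h4 h5 h6 h7 h8]

theorem pipelineA_nh (cn : String) :
    (PySem.Str.lower (PySem.Str.replace
      (pvRomanToNumeral.foldl (fun s p => PySem.Str.replace s p.1 p.2) cn) "-" "")).toList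
      = cn.toList.flatMap pvNhF := by
  simp only [pvRomanToNumeral, List.foldl_cons, List.foldl_nil,
    PySem.Str.toList_lower, PySem.Str.toList_replace]
  rw [show ("-" : String).toList = ['-'] from rfl, show ("" : String).toList = [] from rfl]
  simp only [show ("1" : String).toList = ['1'] from rfl, show ("I" : String).toList = ['I'] from rfl,
    show ("2" : String).toList = ['2'] from rfl, show ("II" : String).toList = ['I','I'] from rfl,
    show ("3" : String).toList = ['3'] from rfl, show ("III" : String).toList = ['I','I','I'] from rfl,
    show ("4" : String).toList = ['4'] from rfl, show ("IV" : String).toList = ['I','V'] from rfl,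
    show ("5" : String).toList = ['5'] from rfl, show ("V" : String).toList = ['V'] from rfl,
    show ("6" : String).toList = ['6'] from rfl, show ("VI" : String).toList = ['V','I'] from rfl,
    show ("7" : String).toList = ['7'] from rfl, show ("VIII" : String).toList = ['V','I','I','I'] from rfl,
    show ("8" : String).toList = ['8'] from rfl, show ("VII" : String).toList = ['V','I','I'] from rfl]
  simp only [replace_single, PySem.Chars.lower, List.map_flatMap, List.flatMap_assoc]
  apply List.flatMap_congr
  intro c _
  by_cases h1 : c = '1'; · subst h1; decide
  by_cases h2 : c = '2'; · subst h2; decide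
  by_cases h3 : c = '3'; · subst h3; decide
  by_cases h4 : c = '4'; · subst h4; decide
  by_cases h5 : c = '5'; · subst h5; decide
  by_cases h6 : c = '6'; · subst h6; decide
  by_cases h7 : c = '7'; · subst h7; decide
  by_cases h8 : c = '8'; · subst h8; decide
  by_cases hd : c = '-'; · subst hd; decide
  simp [h1, h2, h3, h4, h5, h6, h7, h8, hd, pvNhF, get?_none c h1 h2 h3 h4 h5 h6 h7 h8]

theorem main_eq (cn : String) :
    normalize_course_name cn = normalize_course_name_alt cn := by
  unfold normalize_course_name normalize_course_name_alt
  simp only [pvNumeralToRoman, List.foldl_cons, List.foldl_nil]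
  rw [foldB_eq]
  have hws := pipelineA_ws cn
  have hnh := pipelineA_nh cn
  set ws := PySem.Str.lower (PySem.Str.replace
    (pvRomanToNumeral.foldl (fun s p => PySem.Str.replace s p.1 p.2) cn) "-" " ") with hws_def
  set nh := PySem.Str.lower (PySem.Str.replace
    (pvRomanToNumeral.foldl (fun s p => PySem.Str.replace s p.1 p.2) cn) "-" "") with hnh_def
  have hwsI : 'I' ∉ ws.toList := by
    rw [hws]; simp only [List.mem_flatMap, not_exists, not_and]
    intro c _ hx; exact (pvWsF_mem_ne c 'I' hx).1 rfl
  have hwsV : 'V' ∉ ws.toList := by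
    rw [hws]; simp only [List.mem_flatMap, not_exists, not_and]
    intro c _ hx; exact (pvWsF_mem_ne c 'V' hx).2 rfl
  have hnhI : 'I' ∉ nh.toList := by
    rw [hnh]; simp only [List.mem_flatMap, not_exists, not_and]
    intro c _ hx; exact (pvNhF_mem_ne c 'I' hx).1 rfl
  have hnhV : 'V' ∉ nh.toList := by
    rw [hnh]; simp only [List.mem_flatMap, not_exists, not_and]
    intro c _ hx; exact (pvNhF_mem_ne c 'V' hx).2 rfl
  rw [strReplace_id ws "I" "1" 'I' rfl hwsI, strReplace_id nh "I" "1" 'I' rfl hnhI,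
      strReplace_id ws "II" "2" 'I' rfl hwsI, strReplace_id nh "II" "2" 'I' rfl hnhI,
      strReplace_id ws "III" "3" 'I' rfl hwsI, strReplace_id nh "III" "3" 'I' rfl hnhI,
      strReplace_id ws "IV" "4" 'I' rfl hwsI, strReplace_id nh "IV" "4" 'I' rfl hnhI,
      strReplace_id ws "V" "5" 'V' rfl hwsV, strReplace_id nh "V" "5" 'V' rfl hnhV,
      strReplace_id ws "VI" "6" 'V' rfl hwsV, strReplace_id nh "VI" "6" 'V' rfl hnhV,
      strReplace_id ws "VII" "7" 'V' rfl hwsV, strReplace_id nh "VII" "7" 'V' rfl hnhV,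
      strReplace_id ws "VIII" "8" 'V' rfl hwsV, strReplace_id nh "VIII" "8" 'V' rfl hnhV]
  refine Prod.ext ?_ ?_
  · apply String.toList_inj.mp
    simp [hws]
  · apply String.toList_inj.mp
    simp [hnh]

-- ===== VERDICT (by name: the statement is the Claim_ definition above) =====
theorem normalize_course_name_spec : Claim_equal_normalize_course_name := by
  intro cn _
  unfold Spec_normalize_course_name
  exact main_eq cn
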